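-- pv_equiv track=rewrite | github.com/BennyS94/Proiect-Licenta-TableTogheter | src/enrich_foods.py | cue_tags
-- ===== SOURCE A (Python) =====
-- from typing import Dict, List, Tuple, Optional
--
-- def any_token(tokens: List[str], needles: List[str]) -> bool:
--     nset = {n.lower() for n in needles}
--     return any(t in nset for t in tokens)
--
-- def cue_tags(name_tokens: List[str], rules: Dict) -> Dict[str, int]:
--     out = {}
--     for cue, lst in rules.get("process_cues", {}).items():
--         if lst and any_token(name_tokens, lst):
--             out[f"tag_{cue}"] = 1
--     for cue, lst in rules.get("context_cues", {}).items():
--         if lst and any_token(name_tokens, lst):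
--             out[f"tag_{cue}"] = 1
--     # mentinem compatibilitatea cu tag-urile istorice (heuristici simple)
--     if any_token(name_tokens, ["chips", "fries", "wedges", "crisps"]):
--         out["tag_fried_or_chips"] = 1
--     if any_token(name_tokens, ["croissant", "cake", "tart", "donut", "brownie", "cookie", "muffin"]):
--         out["tag_dessert_like"] = 1
--     if any_token(name_tokens, ["white", "pastry", "couscous", "white rice"]):
--         out["tag_refined_carb"] = 1
--     if any_token(name_tokens, ["cream", "cheesy", "alfredo", "carbonara", "mayo", "aioli", "butter"]):
--         out["tag_heavy_sauce"] = 1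
--     if any_token(name_tokens, ["granola", "cornflakes", "frosted", "cocoa"]):
--         out["tag_sugary_breakfast_cereal"] = 1
--     if any_token(name_tokens, ["starch", "potato starch", "rice starch", "cornstarch", "corn starch"]):
--         out["tag_starch_powder"] = 1
--     if any_token(name_tokens, ["pie", "stew", "casserole", "gratin", "bake", "lasagna", "shepherd", "cottage"]):
--         out["tag_composite_dish_hint"] = 1
--     # explicit drink/dairy dessert, chiar daca nu s-au potrivit cues
--     if any_token(name_tokens, ["milkshake","smoothie","juice","soda","cola","soft","lemonade","ice","iced","kefir"]):
--         out["tag_drink"] = 1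
--     if any_token(name_tokens, ["ice","cream","mousse","pudding","flan","custard"]):
--         out["tag_dairy_dessert_hint"] = 1
--
--     return out
-- ===== SOURCE B (Python) =====
-- # B: precompute one inverted index needle.lower() -> rule ids, scan tokens once, then emit tags in rule order.
--
-- _HARD_RULES = [
--     ("tag_fried_or_chips", ["chips", "fries", "wedges", "crisps"]),
--     ("tag_dessert_like", ["croissant", "cake", "tart", "donut", "brownie", "cookie", "muffin"]),
--     ("tag_refined_carb", ["white", "pastry", "couscous", "white rice"]),
--     ("tag_heavy_sauce", ["cream", "cheesy", "alfredo", "carbonara", "mayo", "aioli", "butter"]),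
--     ("tag_sugary_breakfast_cereal", ["granola", "cornflakes", "frosted", "cocoa"]),
--     ("tag_starch_powder", ["starch", "potato starch", "rice starch", "cornstarch", "corn starch"]),
--     ("tag_composite_dish_hint", ["pie", "stew", "casserole", "gratin", "bake", "lasagna", "shepherd", "cottage"]),
--     ("tag_drink", ["milkshake", "smoothie", "juice", "soda", "cola", "soft", "lemonade", "ice", "iced", "kefir"]),
--     ("tag_dairy_dessert_hint", ["ice", "cream", "mousse", "pudding", "flan", "custard"]),
-- ]
--
-- def cue_tags(name_tokens, rules):
--     rule_list = (
--         [("tag_" + cue, lst) for cue, lst in rules.get("process_cues", {}).items()]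
--         + [("tag_" + cue, lst) for cue, lst in rules.get("context_cues", {}).items()]
--         + _HARD_RULES
--     )
--     pairs = [(n.lower(), i) for i, (_tag, needles) in enumerate(rule_list) for n in needles]
--     index = {}
--     for k, i in pairs:
--         index.setdefault(k, []).append(i)
--     hit = set()
--     for t in name_tokens:
--         hit.update(index.get(t, ()))
--     out = {}
--     for i, (tag, _needles) in enumerate(rule_list):
--         if i in hit:
--             out[tag] = 1
--     return out
-- ===== Notes on version B (the rewrite author's own statement) =====
-- stated objective: alternative
-- what changed: B precomputes one inverted index mapping each lowercased needle to the rule ids it triggers, scans the token list once to collect hit rule ids, and then emits out[tag]=1 in rule order, replacing A's per-rule any_token scans of the token list.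
import Mathlib
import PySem

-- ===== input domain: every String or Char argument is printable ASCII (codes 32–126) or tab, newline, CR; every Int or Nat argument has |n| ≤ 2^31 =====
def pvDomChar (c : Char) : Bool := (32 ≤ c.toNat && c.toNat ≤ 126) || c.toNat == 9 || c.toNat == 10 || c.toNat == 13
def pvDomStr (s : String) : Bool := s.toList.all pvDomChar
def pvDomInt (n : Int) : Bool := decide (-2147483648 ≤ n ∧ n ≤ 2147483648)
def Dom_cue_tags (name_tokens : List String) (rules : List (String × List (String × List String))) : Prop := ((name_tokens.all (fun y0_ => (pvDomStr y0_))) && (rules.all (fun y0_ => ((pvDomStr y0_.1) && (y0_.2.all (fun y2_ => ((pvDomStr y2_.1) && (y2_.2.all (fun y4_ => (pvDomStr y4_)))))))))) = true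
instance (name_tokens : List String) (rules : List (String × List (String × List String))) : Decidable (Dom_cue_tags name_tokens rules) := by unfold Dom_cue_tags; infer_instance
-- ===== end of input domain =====

-- B replaces A's per-rule scans of the token list by one precomputed inverted index
-- (lowercased needle -> rule ids) consulted once per token; same return value (objective: alternative).

-- ===== PORT A =====
-- any_token: nset = {n.lower() for n in needles}; any(t in nset for t in tokens)
def anyTokenA (tokens : List String) (needles : List String) : Bool :=
  let nset := PySem.Set.ofList (needles.map PySem.Str.lower)
  tokens.any (fun t => nset.contains t)

def cue_tags (name_tokens : List String) (rules : List (String × List (String × List String))) : List (String × Int) :=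
  let out0 : PySem.Dict String Int := PySem.Dict.empty
  -- for cue, lst in rules.get("process_cues", {}).items(): if lst and any_token(...): out[f"tag_{cue}"] = 1
  let out1 := ((PySem.Dict.mk rules).getD "process_cues" []).foldl
    (fun out kv => if !kv.2.isEmpty && anyTokenA name_tokens kv.2 then out.insert ("tag_" ++ kv.1) 1 else out) out0
  -- for cue, lst in rules.get("context_cues", {}).items(): ...
  let out2 := ((PySem.Dict.mk rules).getD "context_cues" []).foldl
    (fun out kv => if !kv.2.isEmpty && anyTokenA name_tokens kv.2 then out.insert ("tag_" ++ kv.1) 1 else out) out1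
  let out3 := if anyTokenA name_tokens ["chips", "fries", "wedges", "crisps"] then out2.insert "tag_fried_or_chips" 1 else out2
  let out4 := if anyTokenA name_tokens ["croissant", "cake", "tart", "donut", "brownie", "cookie", "muffin"] then out3.insert "tag_dessert_like" 1 else out3
  let out5 := if anyTokenA name_tokens ["white", "pastry", "couscous", "white rice"] then out4.insert "tag_refined_carb" 1 else out4
  let out6 := if anyTokenA name_tokens ["cream", "cheesy", "alfredo", "carbonara", "mayo", "aioli", "butter"] then out5.insert "tag_heavy_sauce" 1 else out5
  let out7 := if anyTokenA name_tokens ["granola", "cornflakes", "frosted", "cocoa"] then out6.insert "tag_sugary_breakfast_cereal" 1 else out6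
  let out8 := if anyTokenA name_tokens ["starch", "potato starch", "rice starch", "cornstarch", "corn starch"] then out7.insert "tag_starch_powder" 1 else out7
  let out9 := if anyTokenA name_tokens ["pie", "stew", "casserole", "gratin", "bake", "lasagna", "shepherd", "cottage"] then out8.insert "tag_composite_dish_hint" 1 else out8
  let out10 := if anyTokenA name_tokens ["milkshake","smoothie","juice","soda","cola","soft","lemonade","ice","iced","kefir"] then out9.insert "tag_drink" 1 else out9
  let out11 := if anyTokenA name_tokens ["ice","cream","mousse","pudding","flan","custard"] then out10.insert "tag_dairy_dessert_hint" 1 else out10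
  out11.items

-- ===== PORT B =====
def bHardRules : List (String × List String) :=
  [("tag_fried_or_chips", ["chips", "fries", "wedges", "crisps"]),
   ("tag_dessert_like", ["croissant", "cake", "tart", "donut", "brownie", "cookie", "muffin"]),
   ("tag_refined_carb", ["white", "pastry", "couscous", "white rice"]),
   ("tag_heavy_sauce", ["cream", "cheesy", "alfredo", "carbonara", "mayo", "aioli", "butter"]),
   ("tag_sugary_breakfast_cereal", ["granola", "cornflakes", "frosted", "cocoa"]),
   ("tag_starch_powder", ["starch", "potato starch", "rice starch", "cornstarch", "corn starch"]),
   ("tag_composite_dish_hint", ["pie", "stew", "casserole", "gratin", "bake", "lasagna", "shepherd", "cottage"]),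
   ("tag_drink", ["milkshake", "smoothie", "juice", "soda", "cola", "soft", "lemonade", "ice", "iced", "kefir"]),
   ("tag_dairy_dessert_hint", ["ice", "cream", "mousse", "pudding", "flan", "custard"])]

def bRuleList (rules : List (String × List (String × List String))) : List (String × List String) :=
  ((PySem.Dict.mk rules).getD "process_cues" []).map (fun kv => ("tag_" ++ kv.1, kv.2))
  ++ ((PySem.Dict.mk rules).getD "context_cues" []).map (fun kv => ("tag_" ++ kv.1, kv.2))
  ++ bHardRules

-- pairs = [(n.lower(), i) for i, (_tag, needles) in enumerate(rule_list) for n in needles]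
def bPairs (ruleList : List (String × List String)) : List (String × Int) :=
  (PySem.List.enumerate ruleList).flatMap (fun p => p.2.2.map (fun n => (PySem.Str.lower n, p.1)))

-- index.setdefault(k, []).append(i)  ==  index[k] = index.get(k, []) + [i]  (fresh keys append; ported as Dict.modify)
def bIndex (ruleList : List (String × List String)) : PySem.Dict String (List Int) :=
  (bPairs ruleList).foldl (fun d q => d.modify q.1 [] (fun l => l ++ [q.2])) PySem.Dict.empty

def cue_tags_alt (name_tokens : List String) (rules : List (String × List (String × List String))) : List (String × Int) :=
  let ruleList := bRuleList rules
  let index := bIndex ruleList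
  -- hit = set(); for t in name_tokens: hit.update(index.get(t, ()))
  let hit : PySem.Set Int := name_tokens.foldl (fun s t => s.update (index.getD t [])) PySem.Set.empty
  -- out = {}; for i, (tag, _) in enumerate(rule_list): if i in hit: out[tag] = 1
  let out := (PySem.List.enumerate ruleList).foldl
    (fun out p => if hit.contains p.1 then out.insert p.2.1 1 else out) (PySem.Dict.empty : PySem.Dict String Int)
  out.items

-- ===== PRECONDITION & SPEC =====
def Spec_cue_tags (name_tokens : List String) (rules : List (String × List (String × List String))) (out : List (String × Int)) : Prop := out = cue_tags_alt name_tokens rules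
instance (name_tokens : List String) (rules : List (String × List (String × List String))) (out : List (String × Int)) : Decidable (Spec_cue_tags name_tokens rules out) := by unfold Spec_cue_tags; infer_instance

-- ===== CLAIM (what is proved, stated in full; the proofs are below) =====
def Claim_equal_cue_tags : Prop := ∀ (name_tokens : List String) (rules : List (String × List (String × List String))), Dom_cue_tags name_tokens rules → Spec_cue_tags name_tokens rules (cue_tags name_tokens rules)

-- ===== LEMMAS AND PROOFS =====

theorem anyTokenA_nil (tokens : List String) : anyTokenA tokens [] = false := by
  simp [anyTokenA, PySem.Set.ofList]

theorem anyTokenA_iff (tokens needles : List String) :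
    anyTokenA tokens needles = true ↔ ∃ t ∈ tokens, ∃ n ∈ needles, PySem.Str.lower n = t := by
  simp only [anyTokenA, List.any_eq_true, PySem.Set.contains_iff, PySem.Set.mem_ofList,
    List.mem_map]

-- i is recorded in the index under key t iff some rule with id i has a needle lowering to t
theorem mem_bIndex_iff (rl : List (String × List String)) (t : String) (i : Int) :
    i ∈ (bIndex rl).getD t [] ↔
      ∃ p ∈ PySem.List.enumerate rl, p.1 = i ∧ ∃ n ∈ p.2.2, PySem.Str.lower n = t := by
  rw [bIndex, PySem.Dict.getD_foldl_modify_append, PySem.Dict.getD_empty]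
  simp only [List.nil_append, bPairs, List.mem_map, List.mem_filter, List.mem_flatMap]
  constructor
  · rintro ⟨q, ⟨⟨p, hp, n, hn, rfl⟩, hkey⟩, hval⟩
    exact ⟨p, hp, hval, n, hn, by simpa using hkey⟩
  · rintro ⟨p, hp, hi, n, hn, hln⟩
    exact ⟨(PySem.Str.lower n, p.1), ⟨⟨p, hp, n, hn, rfl⟩, by simp [hln]⟩, hi⟩

theorem mem_hit_iff (tokens : List String) (index : PySem.Dict String (List Int)) (s0 : PySem.Set Int) (i : Int) :
    i ∈ tokens.foldl (fun s t => s.update (index.getD t [])) s0 ↔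
      i ∈ s0 ∨ ∃ t ∈ tokens, i ∈ index.getD t [] := by
  induction tokens generalizing s0 with
  | nil => simp
  | cons t ts ih =>
      rw [List.foldl_cons, ih]
      rw [PySem.Set.mem_update]
      constructor
      · rintro (⟨h | h⟩ | ⟨u, hu, hi⟩)
        · exact Or.inl h
        · exact Or.inr ⟨t, List.mem_cons_self, h⟩
        · exact Or.inr ⟨u, List.mem_cons_of_mem _ hu, hi⟩
      · rintro (h | ⟨u, hu, hi⟩)
        · exact Or.inl (Or.inl h)
        · rcases List.mem_cons.mp hu with rfl | hu'
          · exact Or.inl (Or.inr hi)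
          · exact Or.inr ⟨u, hu', hi⟩

-- for an entry p of enumerate rl, membership of p.1 in the hit set is exactly any_token on p's needles
theorem hit_contains_eq (tokens : List String) (rl : List (String × List String))
    (p : Int × String × List String) (hp : p ∈ PySem.List.enumerate rl) :
    (tokens.foldl (fun s t => s.update ((bIndex rl).getD t [])) PySem.Set.empty).contains p.1
      = anyTokenA tokens p.2.2 := by
  have hnd : ∀ q ∈ PySem.List.enumerate rl, q.1 = p.1 → q = p := by
    intro q hq hqp
    rcases (PySem.List.mem_enumerate_iff rl 0 q).mp hq with ⟨k, hk, rfl⟩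
    rcases (PySem.List.mem_enumerate_iff rl 0 p).mp hp with ⟨k2, hk2, hp2⟩
    have hkk : (k : Int) = k2 := by rw [hp2] at hqp; simpa using hqp
    have hkk2 : k = k2 := by exact_mod_cast hkk
    subst hkk2; exact hp2.symm
  by_cases h : anyTokenA tokens p.2.2 = true
  · rw [h, PySem.Set.contains_iff, mem_hit_iff]
    rcases (anyTokenA_iff tokens p.2.2).mp h with ⟨t, ht, n, hn, hln⟩
    exact Or.inr ⟨t, ht, (mem_bIndex_iff rl t p.1).mpr ⟨p, hp, rfl, n, hn, hln⟩⟩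
  · rw [Bool.not_eq_true] at h
    rw [h, ← Bool.not_eq_true, PySem.Set.contains_iff, mem_hit_iff]
    rintro (habs | ⟨t, ht, hi⟩)
    · simp [PySem.Set.empty] at habs
    · rcases (mem_bIndex_iff rl t p.1).mp hi with ⟨q, hq, hqi, n, hn, hln⟩
      have hqp : q = p := hnd q hq hqi
      have hT : anyTokenA tokens p.2.2 = true :=
        (anyTokenA_iff tokens p.2.2).mpr ⟨t, ht, n, by rw [← hqp]; exact hn, hln⟩
      rw [h] at hT; exact absurd hT (by simp)

-- the '!isEmpty &&' guard of A coincides with the bare any_token test (any_token of [] is false)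
theorem sectionFold (tokens : List String) (l : List (String × List String)) (d : PySem.Dict String Int) :
    l.foldl (fun out kv => if !kv.2.isEmpty && anyTokenA tokens kv.2 then out.insert ("tag_" ++ kv.1) 1 else out) d
      = l.foldl (fun out kv => if anyTokenA tokens kv.2 then out.insert ("tag_" ++ kv.1) 1 else out) d := by
  apply PySem.List.foldl_congr_mem
  intro acc kv _
  rcases kv with ⟨c, ls⟩
  cases ls with
  | nil => simp [anyTokenA_nil]
  | cons a as => simp

-- A's whole body is the uniform fold over bRuleList with the any_token test
theorem cue_tags_eq_fold (tokens : List String) (rules : List (String × List (String × List String))) :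
    cue_tags tokens rules =
      ((bRuleList rules).foldl
        (fun out r => if anyTokenA tokens r.2 then out.insert r.1 1 else out)
        (PySem.Dict.empty : PySem.Dict String Int)).items := by
  simp only [cue_tags]
  rw [bRuleList, List.foldl_append, List.foldl_append, List.foldl_map, List.foldl_map]
  rw [sectionFold, sectionFold]
  rfl

-- B's final emission fold equals the same uniform fold
theorem cue_tags_alt_eq_fold (tokens : List String) (rules : List (String × List (String × List String))) :
    cue_tags_alt tokens rules =
      ((bRuleList rules).foldl
        (fun out r => if anyTokenA tokens r.2 then out.insert r.1 1 else out)
        (PySem.Dict.empty : PySem.Dict String Int)).items := by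
  rw [cue_tags_alt]
  congr 1
  rw [PySem.List.foldl_congr_mem _ _
    (fun out (p : Int × String × List String) =>
      if anyTokenA tokens p.2.2 then out.insert p.2.1 1 else out) _
    (by
      intro acc p hp
      rw [hit_contains_eq tokens (bRuleList rules) p hp])]
  conv_rhs => rw [← PySem.List.map_snd_enumerate (bRuleList rules) 0]
  rw [List.foldl_map]

-- ===== VERDICT (by name: the statement is the Claim_ definition above) =====
theorem cue_tags_spec : Claim_equal_cue_tags := by
  intro name_tokens rules _
  unfold Spec_cue_tags
  rw [cue_tags_eq_fold, cue_tags_alt_eq_fold]
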